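-- pv_equiv track=rewrite | github.com/willpowers2020/lottery-data | src/mld/legacy/truth_table.py | generate_truth_table
-- ===== SOURCE A (Python) =====
-- import itertools
--
-- def increment_digit(d):
--     """Digit + 1 with wrap: 9 → 0"""
--     return (int(d) + 1) % 10
--
-- def decrement_digit(d):
--     """Digit - 1 with wrap: 0 → 9"""
--     return (int(d) - 1) % 10
--
-- def generate_truth_table(number):
--     """
--     Generate all ±1 combinations for a 4-digit number.
--     Each digit can be: original, +1, or -1 (mod 10).
--     Returns list of 81 strings (3^4 combinations).
--     """
--     digits = list(str(number).zfill(4))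
--
--     # For each digit position: [original, +1, -1]
--     digit_options = [
--         [d, str(increment_digit(d)), str(decrement_digit(d))]
--         for d in digits
--     ]
--
--     # Cartesian product of all digit options
--     combinations = list(itertools.product(*digit_options))
--
--     # Convert tuples to strings
--     return [''.join(combo) for combo in combinations]
-- ===== SOURCE B (Python) =====
-- def generate_truth_table(number):
--     """
--     Generate all ±1 combinations for a 4-digit number.
--     Mixed-radix counter: each i in range(3**n) is decoded in base 3,
--     one trit per digit position (last position varies fastest).
--     """
--     digits = list(str(number).zfill(4))
--     digit_options = [
--         [d, str((int(d) + 1) % 10), str((int(d) - 1) % 10)]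
--         for d in digits
--     ]
--
--     def decode(options, i):
--         if not options:
--             return ''
--         w = 3 ** (len(options) - 1)
--         return options[0][i // w] + decode(options[1:], i % w)
--
--     return [decode(digit_options, i) for i in range(3 ** len(digit_options))]
-- ===== Notes on version B (the rewrite author's own statement) =====
-- stated objective: alternative
-- what changed: Replaces the itertools.product Cartesian-product enumeration with an explicit mixed-radix counter: each index i in range(3**n) is decoded in base 3 to pick one option per digit position, recursively by quotient/remainder.
import Mathlib
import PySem

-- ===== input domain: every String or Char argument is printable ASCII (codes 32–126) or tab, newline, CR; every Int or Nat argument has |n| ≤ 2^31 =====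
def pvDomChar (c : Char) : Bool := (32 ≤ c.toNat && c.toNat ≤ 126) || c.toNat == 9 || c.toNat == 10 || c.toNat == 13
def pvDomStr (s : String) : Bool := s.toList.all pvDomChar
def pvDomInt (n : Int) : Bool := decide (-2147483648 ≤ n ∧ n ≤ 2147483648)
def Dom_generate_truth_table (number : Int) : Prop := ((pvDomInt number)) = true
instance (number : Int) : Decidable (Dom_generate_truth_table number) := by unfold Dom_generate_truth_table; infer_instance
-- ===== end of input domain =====

-- B replaces itertools.product with a mixed-radix (base-3) counter decode; alternative decomposition, same values.
-- Both Pythons build digit_options identically, so the ports share gttOptions.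

-- ===== PORT A =====
-- digit_options: for each digit d of str(number).zfill(4): [d, str((int(d)+1)%10), str((int(d)-1)%10)].
-- int(d) raises ValueError on a non-digit char (the '-' of a negative number): Pre_ excludes that, so .getD 0 is never hit inside Pre_.
def gttOptions (number : Int) : List (List (List Char)) :=
  (PySem.Chars.zfill (PySem.Int.toChars number) 4).map (fun d =>
    [[d],
     PySem.Int.toChars (PySem.Int.mod (((PySem.Int.ofChars? [d]).getD 0) + 1) 10),
     PySem.Int.toChars (PySem.Int.mod (((PySem.Int.ofChars? [d]).getD 0) - 1) 10)])

-- itertools.product(*pools): first pool varies slowest, last fastest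
def gttProduct {α : Type} : List (List α) → List (List α)
  | [] => [[]]
  | p :: ps => p.flatMap (fun x => (gttProduct ps).map (fun c => x :: c))

def generate_truth_table (number : Int) : List String :=
  let digit_options := gttOptions number
  let combinations := gttProduct digit_options
  combinations.map (fun combo => String.ofList (PySem.Chars.join [] combo))

-- ===== PORT B =====
-- decode(options, i): base-3 decode, options[0][i // 3^(len-1)] ++ decode(rest, i % 3^(len-1)).
-- options[0][...] is PySem.List.pyGet?; the index is always in range for i in range(3^n), so .getD [] is never hit.
def gttDecode : List (List (List Char)) → Int → List Char
  | [], _ => []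
  | o :: rest, i =>
    let w : Int := 3 ^ rest.length
    (PySem.List.pyGet? o (PySem.Int.floordiv i w)).getD [] ++ gttDecode rest (PySem.Int.mod i w)

def generate_truth_table_alt (number : Int) : List String :=
  let digit_options := gttOptions number
  (PySem.List.pyRange 0 (3 ^ digit_options.length) 1).map
    (fun i => String.ofList (gttDecode digit_options i))

-- ===== PRECONDITION & SPEC =====
-- Pre_ excludes negative numbers: there str(number) starts with '-' and int('-') raises ValueError in A (and in B).
def Pre_generate_truth_table (number : Int) : Prop := 0 ≤ number
instance (number : Int) : Decidable (Pre_generate_truth_table number) := by unfold Pre_generate_truth_table; infer_instance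
def pvWitness_generate_truth_table : Int := 5

def Spec_generate_truth_table (number : Int) (out : List String) : Prop := out = generate_truth_table_alt number
instance (number : Int) (out : List String) : Decidable (Spec_generate_truth_table number out) := by unfold Spec_generate_truth_table; infer_instance

-- ===== CLAIM (what is proved, stated in full; the proofs are below) =====
def Claim_equal_generate_truth_table : Prop := ∀ (number : Int), Dom_generate_truth_table number → Pre_generate_truth_table number → Spec_generate_truth_table number (generate_truth_table number)

-- ===== LEMMAS AND PROOFS =====

-- join with empty separator distributes over cons
theorem gtt_join_nil_cons (x : List Char) (c : List (List Char)) :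
    PySem.Chars.join [] (x :: c) = x ++ PySem.Chars.join [] c := by
  cases c with
  | nil => simp [PySem.Chars.join_singleton, PySem.Chars.join_nil]
  | cons y t => simp [PySem.Chars.join_cons_cons]

-- decode at q*m + r with 0 ≤ r < m picks entry q of the head option
theorem gtt_decode_split (o : List (List Char)) (os : List (List (List Char)))
    (q r : Int) (hr0 : 0 ≤ r) (hr : r < 3 ^ os.length) :
    gttDecode (o :: os) (q * 3 ^ os.length + r)
      = (PySem.List.pyGet? o q).getD [] ++ gttDecode os r := by
  have hm : (0:Int) < 3 ^ os.length := by positivity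
  have hq : PySem.Int.floordiv (q * 3 ^ os.length + r) (3 ^ os.length) = q := by
    rw [PySem.Int.floordiv_eq_iff_of_pos hm]
    constructor <;> nlinarith
  have hmod : PySem.Int.mod (q * 3 ^ os.length + r) (3 ^ os.length) = r := by
    have := PySem.Int.floordiv_mul_add_mod (q * 3 ^ os.length + r) (3 ^ os.length)
    rw [hq] at this
    linarith
  simp only [gttDecode, hq, hmod]

-- one segment of the counter range: indices q*m .. (q+1)*m-1 all pick entry q of the head option
theorem gtt_seg (o : List (List Char)) (os : List (List (List Char)))
    (x : List Char) (q : Int) (hx : PySem.List.pyGet? o q = some x) :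
    (PySem.List.pyRange (q * 3 ^ os.length) ((q + 1) * 3 ^ os.length) 1).map (gttDecode (o :: os))
      = ((PySem.List.pyRange 0 (3 ^ os.length) 1).map (gttDecode os)).map (fun l => x ++ l) := by
  have hm : (0:Int) < 3 ^ os.length := by positivity
  rw [PySem.List.pyRange_one, PySem.List.pyRange_one]
  simp only [List.map_map]
  have harg : ((q + 1) * 3 ^ os.length - q * 3 ^ os.length) = (3 ^ os.length - 0 : Int) := by ring_nf
  rw [harg]
  apply List.map_congr_left
  intro k hk
  simp only [List.mem_range] at hk
  have hk' : (k : Int) < 3 ^ os.length := by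
    rw [sub_zero] at hk
    exact Int.lt_toNat.mp hk
  simp only [Function.comp]
  rw [gtt_decode_split o os q (k : Int) (Int.natCast_nonneg k) hk', hx]
  simp

-- the core equality: the joined Cartesian product equals the base-3 counter enumeration
theorem gtt_key (os : List (List (List Char))) (h3 : ∀ o ∈ os, o.length = 3) :
    (gttProduct os).map (PySem.Chars.join []) =
      (PySem.List.pyRange 0 (3 ^ os.length) 1).map (gttDecode os) := by
  induction os with
  | nil =>
    rw [show ((3:Int) ^ ([] : List (List (List Char))).length) = 1 from rfl,
        PySem.List.pyRange_one]
    simp [gttProduct, gttDecode, PySem.Chars.join_nil]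
  | cons o os ih =>
    have hlen : o.length = 3 := h3 o (List.mem_cons_self)
    have ih' := ih (fun p hp => h3 p (List.mem_cons_of_mem o hp))
    rcases o with _ | ⟨a, _ | ⟨b, _ | ⟨c, _ | ⟨d, t⟩⟩⟩⟩ <;> simp only [List.length] at hlen <;> try omega
    clear hlen
    have hm : (0:Int) < 3 ^ os.length := by positivity
    have hpow : ((3:Int) ^ ([a,b,c] :: os).length) = 3 * 3 ^ os.length := by
      simp [List.length, pow_succ]; ring
    rw [hpow,
        PySem.List.pyRange_one_append 0 (3 ^ os.length) (3 * 3 ^ os.length) (by omega) (by omega),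
        PySem.List.pyRange_one_append (3 ^ os.length) (2 * 3 ^ os.length) (3 * 3 ^ os.length)
          (by omega) (by omega)]
    have s0 := gtt_seg [a,b,c] os a 0 (by simp [PySem.List.pyGet?, PySem.List.pyIdx?])
    have s1 := gtt_seg [a,b,c] os b 1 (by simp [PySem.List.pyGet?, PySem.List.pyIdx?])
    have s2 := gtt_seg [a,b,c] os c 2 (by simp [PySem.List.pyGet?, PySem.List.pyIdx?])
    simp only [zero_mul, zero_add, one_mul] at s0
    simp only [one_mul, show ((1:Int)+1) = 2 from rfl] at s1
    simp only [show ((2:Int)+1) = 3 from rfl] at s2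
    rw [List.map_append, List.map_append, s0, s1, s2, ← ih']
    simp only [gttProduct, List.flatMap_cons, List.flatMap_nil, List.append_nil,
      List.map_append, List.map_map]
    congr 1
    · apply List.map_congr_left; intro l _; simp [Function.comp, gtt_join_nil_cons]
    congr 1
    · apply List.map_congr_left; intro l _; simp [Function.comp, gtt_join_nil_cons]
    · apply List.map_congr_left; intro l _; simp [Function.comp, gtt_join_nil_cons]

-- ===== VERDICT (by name: the statement is the Claim_ definition above) =====
theorem generate_truth_table_spec : Claim_equal_generate_truth_table := by
  intro number _ _
  unfold Spec_generate_truth_table generate_truth_table generate_truth_table_alt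
  simp only
  have h3 : ∀ o ∈ gttOptions number, o.length = 3 := by
    intro o ho
    unfold gttOptions at ho
    simp only [List.mem_map] at ho
    obtain ⟨d, _, rfl⟩ := ho
    rfl
  have h := gtt_key (gttOptions number) h3
  have h' := congrArg (List.map String.ofList) h
  simpa only [List.map_map, Function.comp] using h'
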